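-- pv_equiv track=rewrite | github.com/j-imsa/ML-Learning | exercises/data_hub_02.py | custom_comparator
-- ===== SOURCE A (Python) =====
-- def custom_comparator(gholam, ghamar):
--     if len(gholam) > len(ghamar):
--         lower = ghamar
--     else:
--         lower = gholam
--
--     for i in range(0, len(lower)):
--         if gholam[i] > ghamar[i]:
--             return 1
--         elif gholam[i] < ghamar[i]:
--             return -1
--
--     return 0
-- ===== SOURCE B (Python) =====
-- def custom_comparator(gholam, ghamar):
--     n = min(len(gholam), len(ghamar))
--     a, b = gholam[:n], ghamar[:n]
--     return -1 if a < b else (1 if a > b else 0)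
-- ===== Notes on version B (the rewrite author's own statement) =====
-- stated objective: idiomatic
-- what changed: Replaces the explicit index loop with early returns by slicing both strings to the common length and delegating the lexicographic comparison to Python's built-in string comparison.
import Mathlib
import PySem

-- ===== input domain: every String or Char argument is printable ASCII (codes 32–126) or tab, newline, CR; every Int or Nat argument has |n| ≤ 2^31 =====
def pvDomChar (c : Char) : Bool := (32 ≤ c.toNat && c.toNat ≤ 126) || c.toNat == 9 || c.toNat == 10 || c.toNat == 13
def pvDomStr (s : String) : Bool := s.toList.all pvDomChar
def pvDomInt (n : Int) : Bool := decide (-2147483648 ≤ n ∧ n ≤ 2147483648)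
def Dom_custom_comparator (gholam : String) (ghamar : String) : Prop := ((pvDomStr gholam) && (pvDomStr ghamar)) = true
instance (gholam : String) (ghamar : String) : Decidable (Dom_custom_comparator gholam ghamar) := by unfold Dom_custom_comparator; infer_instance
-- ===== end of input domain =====

-- B replaces A's explicit index loop with slicing both strings to the common length and
-- delegating to the built-in lexicographic comparison (objective: idiomatic; return value only).

-- ===== PORT A =====
-- the 'for i in range(0, len(lower))' loop with its early returns, as index recursion
def ccLoop (g h : List Char) (i n : Nat) : Int :=
  if hlt : i < n then
    if g.getD i default > h.getD i default then 1
    else if g.getD i default < h.getD i default then -1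
    else ccLoop g h (i + 1) n
  else 0
termination_by n - i

def custom_comparator (gholam : String) (ghamar : String) : Int :=
  let g := gholam.toList
  let h := ghamar.toList
  let lower := if g.length > h.length then h else g
  ccLoop g h 0 lower.length

-- ===== PORT B =====
def custom_comparator_alt (gholam : String) (ghamar : String) : Int :=
  let n : Nat := min gholam.toList.length ghamar.toList.length
  let a := PySem.List.slice gholam.toList none (some (n : Int))
  let b := PySem.List.slice ghamar.toList none (some (n : Int))
  if a < b then -1 else if b < a then 1 else 0

-- ===== PRECONDITION & SPEC =====
def Spec_custom_comparator (gholam : String) (ghamar : String) (out : Int) : Prop := out = custom_comparator_alt gholam ghamar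
instance (gholam : String) (ghamar : String) (out : Int) : Decidable (Spec_custom_comparator gholam ghamar out) := by unfold Spec_custom_comparator; infer_instance

-- ===== CLAIM (what is proved, stated in full; the proofs are below) =====
def Claim_equal_custom_comparator : Prop := ∀ (gholam : String) (ghamar : String), Dom_custom_comparator gholam ghamar → Spec_custom_comparator gholam ghamar (custom_comparator gholam ghamar)

-- ===== LEMMAS AND PROOFS =====

-- structural version of A's scan over the two lists
def cmpL : List Char → List Char → Int
  | a :: as, b :: bs =>
    if a > b then 1 else if a < b then -1 else cmpL as bs
  | _, _ => 0

lemma cmpL_nil_left (x : List Char) : cmpL [] x = 0 := by cases x <;> rfl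

lemma cmpL_nil_right (x : List Char) : cmpL x [] = 0 := by cases x <;> rfl

lemma ccLoop_eq_cmpL (g h : List Char) (k i : Nat)
    (hk : min g.length h.length - i = k) :
    ccLoop g h i (min g.length h.length) = cmpL (g.drop i) (h.drop i) := by
  induction k generalizing i with
  | zero =>
    have hni : ¬ i < min g.length h.length := by omega
    rw [ccLoop, dif_neg hni]
    rcases Nat.le_total g.length h.length with hle | hle
    · have : g.drop i = [] := List.drop_eq_nil_of_le (by omega)
      rw [this, cmpL_nil_left]
    · have : h.drop i = [] := List.drop_eq_nil_of_le (by omega)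
      rw [this, cmpL_nil_right]
  | succ k ih =>
    have hi : i < min g.length h.length := by omega
    have hg : i < g.length := by omega
    have hh : i < h.length := by omega
    rw [ccLoop, dif_pos hi]
    rw [List.drop_eq_getElem_cons hg, List.drop_eq_getElem_cons hh]
    rw [List.getD_eq_getElem g default hg, List.getD_eq_getElem h default hh]
    rw [cmpL]
    split_ifs with h1 h2
    · rfl
    · rfl
    · exact ih (i + 1) (by omega)

lemma cmpL_eq_lt (a b : List Char) (hlen : a.length = b.length) :
    cmpL a b = if a < b then -1 else if b < a then 1 else 0 := by
  induction a generalizing b with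
  | nil =>
    have : b = [] := List.eq_nil_of_length_eq_zero (by simpa using hlen.symm)
    subst this
    simp [cmpL_nil_left]
  | cons x xs ih =>
    cases b with
    | nil => simp at hlen
    | cons y ys =>
      rw [cmpL]
      have hxy : (x :: xs) < (y :: ys) ↔ x < y ∨ x = y ∧ xs < ys := List.cons_lt_cons_iff
      have hyx : (y :: ys) < (x :: xs) ↔ y < x ∨ y = x ∧ ys < xs := List.cons_lt_cons_iff
      by_cases h1 : y < x
      · rw [if_pos h1, if_neg (by
          rw [hxy]
          rintro (hc | ⟨rfl, -⟩)
          · exact (lt_asymm h1) hc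
          · exact lt_irrefl _ h1),
          if_pos (by rw [hyx]; exact Or.inl h1)]
      · by_cases h2 : x < y
        · rw [if_neg h1, if_pos h2, if_pos (by rw [hxy]; exact Or.inl h2)]
        · have hxy' : x = y := le_antisymm (not_lt.mp h1) (not_lt.mp h2)
          subst hxy'
          rw [if_neg h1, if_neg h2, ih ys (by simpa using hlen)]
          simp only [hxy, hyx, lt_irrefl, false_or, true_and]

lemma cmpL_take (g h : List Char) :
    cmpL (g.take (min g.length h.length)) (h.take (min g.length h.length)) = cmpL g h := by
  induction g generalizing h with
  | nil => simp [cmpL_nil_left]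
  | cons x xs ih =>
    cases h with
    | nil => simp [cmpL_nil_right]
    | cons y ys =>
      simp only [List.length_cons, Nat.succ_min_succ, List.take_succ_cons]
      rw [cmpL, cmpL]
      split_ifs with h1 h2
      · rfl
      · rfl
      · exact ih ys

theorem custom_comparator_spec : Claim_equal_custom_comparator := by
  intro gholam ghamar _
  unfold Spec_custom_comparator custom_comparator custom_comparator_alt
  simp only []
  set g := gholam.toList
  set h := ghamar.toList
  have hlow : (if g.length > h.length then h else g).length = min g.length h.length := by
    split_ifs with hgt <;> omega
  rw [hlow, ccLoop_eq_cmpL g h (min g.length h.length - 0) 0 rfl]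
  simp only [List.drop_zero]
  rw [PySem.List.slice_to_natCast, PySem.List.slice_to_natCast]
  rw [← cmpL_take g h, cmpL_eq_lt _ _ (by simp)]
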